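-- pv_equiv track=rewrite | github.com/kidlovecat/Python-Ptit | so_loc_phat_dep.py | check
-- ===== SOURCE A (Python) =====
-- def check(n):
--     check = 0
--     for i in n:
--         if i == '6': check = 1
--         elif i == '8' and check == 1: check = 2
--         elif i == '8' and check == 2: check = 0
--         else: return False
--     return True
-- ===== SOURCE B (Python) =====
-- def check(n):
--     # Run-based validation: split n into maximal runs of equal characters.
--     # A '6' run of any length is fine; an '8' run is fine only if it is not
--     # the first run and has length at most 2; anything else fails.
--     i, L, first = 0, len(n), True
--     while i < L:
--         j = i
--         while j < L and n[j] == n[i]: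
--             j += 1
--         if n[i] == '6':
--             pass
--         elif n[i] == '8':
--             if first or j - i > 2:
--                 return False
--         else:
--             return False
--         first = False
--         i = j
--     return True
-- ===== Notes on version B (the rewrite author's own statement) =====
-- stated objective: alternative
-- what changed: Replaced the per-character three-state machine with a run-based scan: split the string into maximal runs of equal characters and validate each run ('6' any length; '8' only when not first and length <= 2).
import Mathlib
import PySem

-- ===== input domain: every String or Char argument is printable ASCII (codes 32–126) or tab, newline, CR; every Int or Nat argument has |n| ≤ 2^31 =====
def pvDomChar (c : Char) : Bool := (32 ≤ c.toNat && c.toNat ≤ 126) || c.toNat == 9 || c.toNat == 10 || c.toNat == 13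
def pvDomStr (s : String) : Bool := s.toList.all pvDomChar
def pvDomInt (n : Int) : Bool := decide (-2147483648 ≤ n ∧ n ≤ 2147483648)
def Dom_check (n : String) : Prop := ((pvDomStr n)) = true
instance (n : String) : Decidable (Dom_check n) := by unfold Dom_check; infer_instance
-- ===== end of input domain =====

-- B replaces A's per-character three-state machine by a run-based scan over maximal
-- runs of equal characters ('6' any length; '8' only when not the first run and of
-- length at most 2): an alternative decomposition, not claimed faster.

-- ===== PORT A =====
-- literal port of A's for-loop; `c` is the Python int variable `check`
def checkGo : List Char → Int → Bool
  | [], _ => true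
  | i :: rest, c =>
    if i = '6' then checkGo rest 1
    else if i = '8' ∧ c = 1 then checkGo rest 2
    else if i = '8' ∧ c = 2 then checkGo rest 0
    else false

def check (n : String) : Bool := checkGo n.toList 0

-- ===== PORT B =====
-- literal port of Source B's outer while-loop; the inner `while n[j] == n[i]` scan is the
-- takeWhile/dropWhile split of the current maximal run (j - i = takeWhile.length + 1)
def checkAltGo : List Char → Bool → Bool
  | [], _ => true
  | c :: rest, first =>
    if c = '6' then checkAltGo (rest.dropWhile (fun x => x == c)) false
    else if c = '8' then
      if first || (rest.takeWhile (fun x => x == c)).length + 1 > 2 then false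
      else checkAltGo (rest.dropWhile (fun x => x == c)) false
    else false
termination_by l _ => l.length
decreasing_by
  all_goals
    simp only [List.length_cons]
    exact Nat.lt_succ_of_le (List.length_dropWhile_le _ _)

def check_alt (n : String) : Bool := checkAltGo n.toList true

-- ===== PRECONDITION & SPEC =====
def Spec_check (n : String) (out : Bool) : Prop := out = check_alt n
instance (n : String) (out : Bool) : Decidable (Spec_check n out) := by unfold Spec_check; infer_instance

-- ===== CLAIM (what is proved, stated in full; the proofs are below) =====
def Claim_equal_check : Prop := ∀ (n : String), Dom_check n → Spec_check n (check n)

-- ===== LEMMAS AND PROOFS =====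

-- skipping a run of '6's keeps A's machine in state 1
theorem checkGo_sixes (t m : List Char) (h : ∀ x ∈ t, x = '6') :
    checkGo (t ++ m) 1 = checkGo m 1 := by
  induction t with
  | nil => rfl
  | cons a t ih =>
    have ha : a = '6' := h a (List.mem_cons_self ..)
    simp only [List.cons_append, checkGo, ha]
    exact ih (fun x hx => h x (List.mem_cons_of_mem _ hx))

-- the head of `dropWhile (· == c)` is never c
theorem dropWhile_head_ne (l : List Char) (c : Char) :
    (l.dropWhile (fun x => x == c)).head? ≠ some c := by
  induction l with
  | nil => simp
  | cons a l ih =>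
    by_cases h : a = c
    · simpa [h] using ih
    · simp [h]

-- every element of `takeWhile (· == c)` is c
theorem mem_takeWhile_eq {l : List Char} {c x : Char}
    (h : x ∈ l.takeWhile (fun y => y == c)) : x = c := by
  have := List.mem_takeWhile_imp h
  simpa using this

-- A's state-machine scan equals B's run-based scan, for the three state/flag
-- configurations that can occur at a run boundary
theorem main_lemma (N : ℕ) : ∀ l : List Char, l.length ≤ N →
    (checkGo l 0 = checkAltGo l true) ∧
    (checkGo l 1 = checkAltGo l false) ∧
    (l.head? ≠ some '8' →
      checkGo l 2 = checkAltGo l false ∧ checkGo l 0 = checkAltGo l false) := by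
  induction N with
  | zero =>
    intro l hl
    have : l = [] := List.length_eq_zero_iff.mp (Nat.le_zero.mp hl)
    subst this
    refine ⟨by simp [checkGo, checkAltGo], by simp [checkGo, checkAltGo],
      fun _ => ⟨by simp [checkGo, checkAltGo], by simp [checkGo, checkAltGo]⟩⟩
  | succ N ih =>
    intro l hl
    match l with
    | [] =>
      exact ⟨by simp [checkGo, checkAltGo], by simp [checkGo, checkAltGo],
        fun _ => ⟨by simp [checkGo, checkAltGo], by simp [checkGo, checkAltGo]⟩⟩
    | c :: rest =>
      have hrest : rest.length ≤ N := by
        simpa [List.length_cons, Nat.succ_le_succ_iff] using hl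
      have htd : rest.takeWhile (fun x => x == c) ++ rest.dropWhile (fun x => x == c) = rest :=
        List.takeWhile_append_dropWhile
      have hdlen : (rest.dropWhile (fun x => x == c)).length ≤ N :=
        le_trans (List.length_dropWhile_le _ _) hrest
      by_cases hc6 : c = '6'
      · -- a '6'-run: both sides skip it and continue from state 1 / flag false
        subst hc6
        have hgo : ∀ s : Int, checkGo ('6' :: rest) s = checkGo rest 1 := by
          intro s; simp [checkGo]
        have hstep : checkGo rest 1 = checkGo (rest.dropWhile (fun x => x == '6')) 1 := by
          conv_lhs => rw [← htd]
          exact checkGo_sixes _ _ (fun x hx => mem_takeWhile_eq hx)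
        have halt : ∀ f : Bool,
            checkAltGo ('6' :: rest) f = checkAltGo (rest.dropWhile (fun x => x == '6')) false := by
          intro f; simp [checkAltGo]
        have hihd := (ih _ hdlen).2.1
        refine ⟨?_, ?_, fun _ => ⟨?_, ?_⟩⟩ <;>
          simp [hgo, halt, hstep, hihd]
      · by_cases hc8 : c = '8'
        · -- an '8'-run: A dies from state 0 / on a 3rd '8'; B checks first/length
          subst hc8
          constructor
          · -- state 0 / first = true: both reject immediately
            simp [checkGo, checkAltGo]
          constructor
          · -- state 1 / first = false: case on the run length
            match htw : rest.takeWhile (fun x => x == '8') with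
            | [] =>
              have hd : rest.dropWhile (fun x => x == '8') = rest := by
                rw [htw] at htd; simpa using htd
              have hhead : rest.head? ≠ some '8' := by
                rw [← hd]; exact dropWhile_head_ne rest '8'
              have h3 := ((ih rest hrest).2.2 hhead).1
              have hr : checkAltGo ('8' :: rest) false = checkAltGo rest false := by
                rw [checkAltGo, htw, hd]; norm_num
              have hlft : checkGo ('8' :: rest) 1 = checkGo rest 2 := by simp [checkGo]
              rw [hlft, hr, h3]
            | x :: t' =>
              have hx : x = '8' := mem_takeWhile_eq (htw ▸ List.mem_cons_self ..)
              subst hx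
              have hrest_eq : rest = '8' :: (t' ++ rest.dropWhile (fun x => x == '8')) := by
                conv_lhs => rw [← htd, htw]
                simp
              have hlft : checkGo ('8' :: rest) 1 = checkGo rest 2 := by simp [checkGo]
              match t' with
              | [] =>
                simp only [List.nil_append] at hrest_eq
                have hhead : (rest.dropWhile (fun x => x == '8')).head? ≠ some '8' :=
                  dropWhile_head_ne rest '8'
                have h3 := ((ih _ hdlen).2.2 hhead).2
                have hmid : checkGo rest 2 = checkGo (rest.dropWhile (fun x => x == '8')) 0 := by
                  conv_lhs => rw [hrest_eq]
                  simp [checkGo]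
                have hr : checkAltGo ('8' :: rest) false =
                    checkAltGo (rest.dropWhile (fun x => x == '8')) false := by
                  rw [checkAltGo, htw]; simp
                rw [hlft, hmid, hr, h3]
              | y :: t'' =>
                have hy : y = '8' := mem_takeWhile_eq (htw ▸ List.mem_cons_of_mem _ (List.mem_cons_self ..))
                subst hy
                have hmid : checkGo rest 2 = false := by
                  conv_lhs => rw [hrest_eq]
                  simp [checkGo]
                have hr : checkAltGo ('8' :: rest) false = false := by
                  rw [checkAltGo, htw]; simp
                rw [hlft, hmid, hr]
          · -- head = '8' contradicts the hypothesis of part 3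
            intro hne
            exact (hne (by simp)).elim
        · -- any other character: both reject
          refine ⟨?_, ?_, fun _ => ⟨?_, ?_⟩⟩ <;>
            simp [checkGo, checkAltGo, hc6, hc8]

-- ===== VERDICT =====
theorem check_spec : Claim_equal_check := by
  intro n _
  unfold Spec_check check check_alt
  exact (main_lemma n.toList.length n.toList le_rfl).1
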